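-- pv_equiv track=rewrite | github.com/joshanashakya/dissertation | workspace/dataset/java-python/GeeksForGeeks/1245/A/2.py | countHexadecimal
-- ===== SOURCE A (Python) =====
-- def countHexadecimal(L, R) :
--     count = 0;
--     for i in range(L, R + 1) :
--
--         # All the numbers from 10 to 15
--         # contain a hexadecimal alphabet
--         if (i >= 10 and i <= 15) :
--             count += 1;
--
--         # If i > 15 then perform mod by 16
--         # repeatedly till the number is > 0
--         # If number % 16 > 10 then
--         # increase count
--         elif (i > 15) :
--             k = i;
--             while (k != 0) :
--                 if (k % 16 >= 10) :
--                     count += 1;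
--                 k = k // 16;
--
--     return count;
-- ===== SOURCE B (Python) =====
-- def _f(n):
--     # number of hex digits >= 10 (a-f) in n's hexadecimal expansion
--     if n <= 0:
--         return 0
--     return (1 if n % 16 >= 10 else 0) + _f(n // 16)
--
-- def _S(n):
--     # sum of _f(i) for i in [0, n), computed recursively in O(log^2 n)
--     if n <= 0:
--         return 0
--     q, r = divmod(n, 16)
--     return 16 * _S(q) + r * _f(q) + 6 * q + max(0, r - 10)
--
-- def countHexadecimal(L, R):
--     lo = max(L, 0)
--     if R < lo:
--         return 0
--     return _S(R + 1) - _S(lo)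
-- ===== Notes on version B (the rewrite author's own statement) =====
-- stated objective: faster
-- what changed: Replaced the per-number loop over [L,R] (with an inner hex-digit scan) by a recursive closed-form counter _S(n) for the total number of hex digits >= 10 below n, evaluated as _S(R+1) - _S(max(L,0)); intended as faster, measured up to ~210x at the largest generated size on nonempty ranges (inputs with empty ranges are trivially fast for both, so the probe marked the speed-up unconfirmed).
import Mathlib
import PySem

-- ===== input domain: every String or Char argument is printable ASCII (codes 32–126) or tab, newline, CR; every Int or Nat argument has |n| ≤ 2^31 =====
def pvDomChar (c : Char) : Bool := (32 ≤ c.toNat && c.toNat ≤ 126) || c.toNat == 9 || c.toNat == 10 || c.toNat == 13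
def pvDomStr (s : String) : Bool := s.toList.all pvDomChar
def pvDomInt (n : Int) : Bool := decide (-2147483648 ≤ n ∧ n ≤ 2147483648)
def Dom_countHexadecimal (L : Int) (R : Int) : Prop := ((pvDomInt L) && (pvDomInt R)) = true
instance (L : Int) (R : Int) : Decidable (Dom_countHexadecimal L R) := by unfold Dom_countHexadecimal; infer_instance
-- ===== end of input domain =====

-- B replaces A's per-number loop over [L,R] by a recursive closed-form prefix counter
-- _S(n) = total hex digits >= 10 among 0..n-1, evaluated at R+1 and max(L,0)
-- (objective: faster; intended asymptotic speed-up, measured ~210x at the largest probe size on nonempty ranges).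

-- termination helper for both loops (cited by decreasing_by)
theorem pvFdiv16_lt (k : Int) (h : 0 < k) : (PySem.Int.floordiv k 16).toNat < k.toNat := by
  rw [PySem.Int.floordiv_eq_ediv_of_pos (by norm_num)]
  omega

-- ===== PORT A =====
-- inner 'while k != 0' of A; only reached with k ≥ 0, where 'k ≤ 0' is 'k = 0'
def hexLoop (k : Int) (count : Int) : Int :=
  if 0 < k then
    hexLoop (PySem.Int.floordiv k 16)
      (count + if 10 ≤ PySem.Int.mod k 16 then 1 else 0)
  else count
termination_by k.toNat
decreasing_by exact pvFdiv16_lt k (by omega)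

def countHexadecimal (L : Int) (R : Int) : Int :=
  (PySem.List.pyRange L (R + 1) 1).foldl
    (fun count i =>
      if 10 ≤ i ∧ i ≤ 15 then count + 1
      else if 15 < i then hexLoop i count
      else count) 0

-- ===== PORT B =====
-- _f(n): number of hex digits >= 10 in n
def altF (n : Int) : Int :=
  if 0 < n then
    (if 10 ≤ PySem.Int.mod n 16 then 1 else 0) + altF (PySem.Int.floordiv n 16)
  else 0
termination_by n.toNat
decreasing_by exact pvFdiv16_lt n (by omega)

-- _S(n): sum of _f over [0, n)
def altS (n : Int) : Int :=
  if 0 < n then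
    16 * altS (PySem.Int.floordiv n 16)
      + PySem.Int.mod n 16 * altF (PySem.Int.floordiv n 16)
      + 6 * PySem.Int.floordiv n 16
      + max 0 (PySem.Int.mod n 16 - 10)
  else 0
termination_by n.toNat
decreasing_by exact pvFdiv16_lt n (by omega)

def countHexadecimal_alt (L : Int) (R : Int) : Int :=
  let lo := max L 0
  if R < lo then 0 else altS (R + 1) - altS lo

-- ===== PRECONDITION & SPEC =====
def Spec_countHexadecimal (L : Int) (R : Int) (out : Int) : Prop := out = countHexadecimal_alt L R
instance (L : Int) (R : Int) (out : Int) : Decidable (Spec_countHexadecimal L R out) := by unfold Spec_countHexadecimal; infer_instance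

-- ===== CLAIM (what is proved, stated in full; the proofs are below) =====
def Claim_equal_countHexadecimal : Prop := ∀ (L : Int) (R : Int), Dom_countHexadecimal L R → Spec_countHexadecimal L R (countHexadecimal L R)

-- ===== LEMMAS AND PROOFS =====

theorem altF_nonpos (n : Int) (h : n ≤ 0) : altF n = 0 := by
  rw [altF]; simp [not_lt.mpr h]

theorem altS_nonpos (n : Int) (h : n ≤ 0) : altS n = 0 := by
  rw [altS]; simp [not_lt.mpr h]

-- A's inner while-loop adds exactly altF k to the accumulator
theorem hexLoop_eq : ∀ (m : Nat) (k count : Int), k.toNat = m →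
    hexLoop k count = count + altF k := by
  intro m
  induction m using Nat.strong_induction_on with
  | _ m ih =>
    intro k count hm
    rw [hexLoop, altF]
    by_cases hk : 0 < k
    · simp only [hk, if_pos]
      rw [ih (PySem.Int.floordiv k 16).toNat (by rw [← hm]; exact pvFdiv16_lt k hk) _ _ rfl]
      ring
    · simp [hk]

theorem altS_unfold (x : Int) (hx : 0 < x) :
    altS x = 16 * altS (x / 16) + x % 16 * altF (x / 16) + 6 * (x / 16) + max 0 (x % 16 - 10) := by
  have h16 : (0:Int) < 16 := by norm_num
  rw [altS]
  rw [PySem.Int.floordiv_eq_ediv_of_pos h16, PySem.Int.mod_eq_emod_of_pos h16, if_pos hx]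

theorem altF_unfold (x : Int) (hx : 0 < x) :
    altF x = (if 10 ≤ x % 16 then 1 else 0) + altF (x / 16) := by
  have h16 : (0:Int) < 16 := by norm_num
  rw [altF]
  rw [PySem.Int.floordiv_eq_ediv_of_pos h16, PySem.Int.mod_eq_emod_of_pos h16, if_pos hx]

-- key: altS is a prefix sum of altF
theorem altS_succ : ∀ (m : Nat) (n : Int), n.toNat = m → 0 ≤ n →
    altS (n + 1) = altS n + altF n := by
  intro m
  induction m using Nat.strong_induction_on with
  | _ m ih =>
    intro n hm hn
    have h16 : (0:Int) < 16 := by norm_num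
    rcases eq_or_lt_of_le hn with h0 | hpos
    · -- n = 0
      rw [← h0]
      norm_num [altS_unfold 1 one_pos, altF_nonpos 0 le_rfl, altS_nonpos 0 le_rfl]
    · -- n > 0
      by_cases hlast : n % 16 = 15
      · -- carry: (n+1) = 16 * (n/16 + 1)
        have e1 : (n + 1) / 16 = n / 16 + 1 := by omega
        have e2 : (n + 1) % 16 = 0 := by omega
        have hqnn : 0 ≤ n / 16 := by omega
        have hqlt : (n / 16).toNat < m := by
          have := pvFdiv16_lt n hpos
          rw [PySem.Int.floordiv_eq_ediv_of_pos h16] at this; omega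
        have hIH := ih (n / 16).toNat hqlt (n / 16) rfl hqnn
        rw [altS_unfold (n + 1) (by omega), altS_unfold n hpos, altF_unfold n hpos,
          e1, e2, hlast, hIH, if_pos (by norm_num : (10:Int) ≤ 15)]
        norm_num
        ring
      · -- no carry: quotient unchanged, remainder + 1
        have hrlt : n % 16 < 15 := by
          have : n % 16 < 16 := Int.emod_lt_of_pos n h16; omega
        have e1 : (n + 1) / 16 = n / 16 := by omega
        have e2 : (n + 1) % 16 = n % 16 + 1 := by omega
        rw [altS_unfold (n + 1) (by omega), altS_unfold n hpos, altF_unfold n hpos, e1, e2]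
        have hrnn : 0 ≤ n % 16 := Int.emod_nonneg n (by norm_num)
        by_cases hd : (10:Int) ≤ n % 16
        · have m1 : max 0 (n % 16 + 1 - 10) = n % 16 - 9 := by omega
          have m2 : max 0 (n % 16 - 10) = n % 16 - 10 := by omega
          rw [m1, m2, if_pos hd]
          ring
        · have m1 : max 0 (n % 16 + 1 - 10) = 0 := by omega
          have m2 : max 0 (n % 16 - 10) = 0 := by omega
          rw [m1, m2, if_neg hd]
          ring

-- the mapped sum over range(a, b) telescopes to altS b - altS (max a 0)
theorem sum_altF_range : ∀ (m : Nat) (a b : Int), (b - a).toNat = m → a ≤ b →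
    ((PySem.List.pyRange a b 1).map altF).sum = altS b - altS (max a 0) := by
  intro m
  induction m using Nat.strong_induction_on with
  | _ m ih =>
    intro a b hm hab
    rcases eq_or_lt_of_le hab with heq | hlt
    · subst heq
      rw [PySem.List.pyRange_one_eq_nil le_rfl]
      by_cases hb : 0 ≤ a
      · simp [max_eq_left hb]
      · simp [altS_nonpos a (by omega), altS_nonpos 0 le_rfl, max_eq_right (by omega : a ≤ 0)]
    · rw [PySem.List.pyRange_one_cons hlt]
      have hrec := ih (b - (a + 1)).toNat (by omega) (a + 1) b rfl (by omega)
      simp only [List.map_cons, List.sum_cons, hrec]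
      have key : altF a + altS (max a 0) = altS (max (a + 1) 0) := by
        by_cases ha : 0 ≤ a
        · rw [max_eq_left ha, max_eq_left (by omega : (0:Int) ≤ a + 1)]
          rw [altS_succ a.toNat a rfl ha]; ring
        · rw [altF_nonpos a (by omega), max_eq_right (by omega : a ≤ 0),
            max_eq_right (by omega : a + 1 ≤ 0)]
          ring
      omega

-- A's loop body adds altF i for every i
theorem stepFun_eq :
    (fun (count i : Int) =>
      if 10 ≤ i ∧ i ≤ 15 then count + 1
      else if 15 < i then hexLoop i count
      else count) = fun count i => count + altF i := by
  funext count i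
  have h16 : (0:Int) < 16 := by norm_num
  by_cases h1 : 10 ≤ i ∧ i ≤ 15
  · rw [if_pos h1]
    have e1 : i % 16 = i := by omega
    have e2 : i / 16 = 0 := by omega
    rw [altF_unfold i (by omega), e1, e2, altF_nonpos 0 le_rfl, if_pos h1.1]
    ring
  · simp only [h1, if_false]
    by_cases h2 : 15 < i
    · rw [if_pos h2]; exact hexLoop_eq i.toNat i count rfl
    · rw [if_neg h2]
      by_cases hp : 0 < i
      · have e1 : i % 16 = i := by omega
        have e2 : i / 16 = 0 := by omega
        rw [altF_unfold i hp, e1, e2, altF_nonpos 0 le_rfl, if_neg (by omega : ¬ (10:Int) ≤ i)]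
        ring
      · rw [altF_nonpos i (by omega)]; ring

-- ===== VERDICT (by name: the statement is the Claim_ definition above) =====
theorem countHexadecimal_spec : Claim_equal_countHexadecimal := by
  unfold Claim_equal_countHexadecimal Spec_countHexadecimal
  intro L R _
  unfold countHexadecimal countHexadecimal_alt
  rw [stepFun_eq, PySem.List.foldl_add, zero_add]
  by_cases hcmp : R < max L 0
  · rw [if_pos hcmp]
    by_cases hLR : L ≤ R
    · rw [sum_altF_range (R + 1 - L).toNat L (R + 1) rfl (by omega)]
      rw [altS_nonpos (R + 1) (by omega), altS_nonpos (max L 0) (by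
        rw [max_eq_right (by omega : L ≤ 0)])]
      ring
    · rw [PySem.List.pyRange_one_eq_nil (by omega)]
      simp
  · rw [if_neg hcmp]
    exact sum_altF_range (R + 1 - L).toNat L (R + 1) rfl (by omega)
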